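-- pv_equiv track=rewrite | github.com/areumsim/coding_test | coding_test_3_H/3.PY | longest_matching_length
-- ===== SOURCE A (Python) =====
-- def longest_matching_length(X, Y):
--     len_X = len(X)
--     len_Y = len(Y)
--     max_length = 0
--
--     for i in range(len_X):
--         diff_count = 0
--         length = 0
--         for j in range(min(len_Y, len_X - i)):
--             if X[i + j] != Y[j]:
--                 diff_count += 1
--             if diff_count > 1:
--                 break
--             length += 1
--         max_length = max(max_length, length)
--
--     return max_length
-- ===== SOURCE B (Python) =====
-- def longest_matching_length(X, Y):
--     # Precompute ALL longest-common-extension values lce[i][j] = lcp(X[i:], Y[j:])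
--     # by a backward suffix DP (each row from the row below it), then answer each
--     # offset with two O(1) table lookups: first mismatch = lce[i][0], and extend
--     # past it with lce[i + k1 + 1][k1 + 1].
--     n, m = len(X), len(Y)
--     rev = [[0] * (m + 1)]                      # row for the empty suffix X[n:]
--     for i in range(n - 1, -1, -1):
--         below, xi = rev[-1], X[i]
--         row = [b + 1 if xi == y else 0 for y, b in zip(Y, below[1:])]
--         row.append(0)
--         rev.append(row)
--     lce = rev[::-1]                            # lce[i] is the row for X[i:]
--     best = 0
--     for i in range(n):
--         ov = min(m, n - i)
--         k1 = lce[i][0]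
--         cand = ov if k1 >= ov else k1 + 1 + lce[i + k1 + 1][k1 + 1]
--         best = max(best, cand)
--     return best
-- ===== Notes on version B (the rewrite author's own statement) =====
-- stated objective: alternative
-- what changed: A scans each alignment left-to-right counting mismatches with a break; B never counts mismatches per alignment: it precomputes the full table lce[i][j] = lcp(X[i:], Y[j:]) by one backward suffix DP and then answers each offset with two O(1) table lookups (first mismatch = lce[i][0], then extend past it with lce[i+k1+1][k1+1]).
import Mathlib
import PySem

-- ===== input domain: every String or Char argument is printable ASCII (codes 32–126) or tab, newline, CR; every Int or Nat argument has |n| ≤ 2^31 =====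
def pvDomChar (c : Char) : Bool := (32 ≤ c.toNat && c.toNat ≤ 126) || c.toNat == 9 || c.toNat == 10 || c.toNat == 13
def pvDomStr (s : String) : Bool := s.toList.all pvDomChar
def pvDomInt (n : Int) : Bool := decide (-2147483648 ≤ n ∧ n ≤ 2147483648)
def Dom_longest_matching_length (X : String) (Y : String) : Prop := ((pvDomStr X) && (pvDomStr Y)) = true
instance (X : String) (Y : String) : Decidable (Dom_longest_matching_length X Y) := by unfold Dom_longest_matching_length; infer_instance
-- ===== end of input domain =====

-- B replaces A's per-alignment mismatch-counting scan with a backward suffix DP table of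
-- longest common extensions plus two table lookups per offset; alternative algorithm, same cost.

-- ===== PORT A =====
-- inner 'for j in range(...)' with break: structural recursion over the range list
def pvInnerA (X : String) (Y : String) (i : Int) : List Int → Int → Int → Int
  | [], _, length => length
  | j :: rest, diff_count, length =>
    let d := if PySem.Str.pyGet? X (i + j) ≠ PySem.Str.pyGet? Y j then diff_count + 1 else diff_count
    if d > 1 then length
    else pvInnerA X Y i rest d (length + 1)

def longest_matching_length (X : String) (Y : String) : Int :=
  let len_X := PySem.Str.len X
  let len_Y := PySem.Str.len Y
  (PySem.List.pyRange 0 len_X 1).foldl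
    (fun max_length i =>
      max max_length (pvInnerA X Y i (PySem.List.pyRange 0 (min len_Y (len_X - i)) 1) 0 0))
    0

-- ===== PORT B =====
-- row i of the DP table from the row below it: row[j] = below[j+1] + 1 on a match, else 0
def pvRow (xi : Char) : List Char → List Int → List Int
  | [], _ => [0]
  | y :: ys, below => (if xi = y then below.tail.headD 0 + 1 else 0) :: pvRow xi ys below.tail

-- the whole table, built back-to-front (row for suffix X[i:] on top of the rows below it)
def pvTable (xs ys : List Char) : List (List Int) :=
  match xs with
  | [] => [List.replicate (ys.length + 1) 0]
  | x :: xr => pvRow x ys ((pvTable xr ys).headD []) :: pvTable xr ys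

def longest_matching_length_alt (X : String) (Y : String) : Int :=
  let n := PySem.Str.len X
  let m := PySem.Str.len Y
  let lce := pvTable X.toList Y.toList
  (PySem.List.pyRange 0 n 1).foldl
    (fun best i =>
      let ov := min m (n - i)
      let k1 := PySem.List.pyGetD (PySem.List.pyGetD lce i []) 0 0
      let cand := if k1 ≥ ov then ov
        else k1 + 1 + PySem.List.pyGetD (PySem.List.pyGetD lce (i + k1 + 1) []) (k1 + 1) 0
      max best cand)
    0

-- ===== PRECONDITION & SPEC =====
def Spec_longest_matching_length (X : String) (Y : String) (out : Int) : Prop := out = longest_matching_length_alt X Y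
instance (X : String) (Y : String) (out : Int) : Decidable (Spec_longest_matching_length X Y out) := by unfold Spec_longest_matching_length; infer_instance

-- ===== CLAIM (what is proved, stated in full; the proofs are below) =====
def Claim_equal_longest_matching_length : Prop := ∀ (X : String) (Y : String), Dom_longest_matching_length X Y → Spec_longest_matching_length X Y (longest_matching_length X Y)

-- ===== LEMMAS AND PROOFS =====

-- abstract version of A's inner loop over the zipped overlap
def pvInn : List (Char × Char) → Int → Int → Int
  | [], _, L => L
  | (a, b) :: r, d, L =>
    let d' := if a ≠ b then d + 1 else d
    if d' > 1 then L else pvInn r d' (L + 1)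

def pvFirst : List (Char × Char) → Nat
  | [] => 0
  | (a, b) :: r => if a ≠ b then 0 else pvFirst r + 1

def pvSecond : List (Char × Char) → Nat
  | [] => 0
  | (a, b) :: r => if a ≠ b then pvFirst r + 1 else pvSecond r + 1

-- longest common prefix length, the value B's table holds
def pvLcp : List Char → List Char → Nat
  | x :: xs, y :: ys => if x = y then pvLcp xs ys + 1 else 0
  | _, _ => 0

theorem pvInn_one (ps : List (Char × Char)) : ∀ L : Int, pvInn ps 1 L = L + pvFirst ps := by
  induction ps with
  | nil => intro L; simp [pvInn, pvFirst]
  | cons p r ih =>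
    intro L
    obtain ⟨a, b⟩ := p
    by_cases h : a = b
    · simp [pvInn, pvFirst, h, ih]; ring
    · simp [pvInn, pvFirst, h]

theorem pvInn_zero (ps : List (Char × Char)) : ∀ L : Int, pvInn ps 0 L = L + pvSecond ps := by
  induction ps with
  | nil => intro L; simp [pvInn, pvSecond]
  | cons p r ih =>
    intro L
    obtain ⟨a, b⟩ := p
    by_cases h : a = b
    · simp [pvInn, pvSecond, h, ih]; ring
    · simp [pvInn, pvSecond, h, pvInn_one]; ring

-- A's inner loop over the index range computes pvInn on the zipped overlap
theorem pvBridgeA (X Y : String) (i : Nat) (zs : List (Char × Char))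
    (hzs : zs = List.zip (X.toList.drop i) Y.toList) :
    ∀ (n k : Nat), zs.length - k ≤ n → ∀ (d L0 : Int),
      pvInnerA X Y (i : Int) (PySem.List.pyRange (k : Int) (zs.length : Int) 1) d L0
        = pvInn (zs.drop k) d L0 := by
  intro n
  induction n with
  | zero =>
    intro k hk d L0
    have hk' : zs.length ≤ k := by omega
    rw [PySem.List.pyRange_one_eq_nil (by exact_mod_cast hk')]
    rw [List.drop_eq_nil_of_le hk']
    simp [pvInnerA, pvInn]
  | succ n ih =>
    intro k hk d L0
    by_cases hlt : k < zs.length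
    · have hcons : PySem.List.pyRange (k : Int) (zs.length : Int) 1
          = (k : Int) :: PySem.List.pyRange ((k : Int) + 1) (zs.length : Int) 1 :=
        PySem.List.pyRange_one_cons (by exact_mod_cast hlt)
      have hdrop : zs.drop k = zs[k] :: zs.drop (k + 1) := List.drop_eq_getElem_cons hlt
      have hkX : k < (X.toList.drop i).length := by
        have h1 := hlt
        rw [hzs, List.length_zip] at h1; omega
      have hkY : k < Y.toList.length := by
        have h1 := hlt
        rw [hzs, List.length_zip] at h1; omega
      rcases hzk : zs[k] with ⟨a, b⟩
      have hX : PySem.Str.pyGet? X ((i : Int) + (k : Int)) = some a := by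
        have hc : ((i : Int) + (k : Int)) = ((i + k : Nat) : Int) := by push_cast; ring
        rw [hc, PySem.Str.pyGet?_natCast]
        have : zs[k].1 = X.toList[i + k]'(by rw [List.length_drop] at hkX; omega) := by
          subst hzs; simp [List.getElem_zip]
        rw [List.getElem?_eq_getElem (by rw [List.length_drop] at hkX; omega)]
        rw [hzk] at this; simp [← this]
      have hY : PySem.Str.pyGet? Y ((k : Int)) = some b := by
        rw [PySem.Str.pyGet?_natCast]
        have : zs[k].2 = Y.toList[k]'hkY := by
          subst hzs; simp [List.getElem_zip]
        rw [List.getElem?_eq_getElem hkY]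
        rw [hzk] at this; simp [← this]
      rw [hcons, hdrop, hzk]
      have hcast : ((k : Int)) + 1 = (((k + 1 : Nat)) : Int) := by push_cast; ring
      by_cases hab : a = b
      · have h1 : ¬ (PySem.Str.pyGet? X ((i : Int) + (k : Int)) ≠ PySem.Str.pyGet? Y ((k : Int))) := by
          rw [hX, hY]; simp [hab]
        simp only [pvInnerA, pvInn, if_neg h1, if_neg (not_not_intro hab)]
        split_ifs with hd
        · rfl
        · rw [hcast]; exact ih (k + 1) (by omega) d (L0 + 1)
      · have h1 : (PySem.Str.pyGet? X ((i : Int) + (k : Int)) ≠ PySem.Str.pyGet? Y ((k : Int))) := by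
          rw [hX, hY]; simp [hab]
        simp only [pvInnerA, pvInn, if_pos h1, if_pos (by exact hab : a ≠ b)]
        split_ifs with hd
        · rfl
        · rw [hcast]; exact ih (k + 1) (by omega) (d + 1) (L0 + 1)
    · have hk' : zs.length ≤ k := by omega
      rw [PySem.List.pyRange_one_eq_nil (by exact_mod_cast hk')]
      rw [List.drop_eq_nil_of_le hk']
      simp [pvInnerA, pvInn]

-- ===== B-side lemmas: the table holds lcp values, and two lookups give pvSecond =====

theorem pvLcp_le (s t : List Char) : pvLcp s t ≤ min s.length t.length := by
  induction s generalizing t with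
  | nil => simp [pvLcp]
  | cons x xs ih =>
    cases t with
    | nil => simp [pvLcp]
    | cons y ys =>
      by_cases h : x = y
      · have := ih ys
        simp [pvLcp, h]; omega
      · simp [pvLcp, h]

theorem pvFirst_zip (s t : List Char) : pvFirst (List.zip s t) = pvLcp s t := by
  induction s generalizing t with
  | nil => simp [pvFirst, pvLcp]
  | cons x xs ih =>
    cases t with
    | nil => simp [pvFirst, pvLcp]
    | cons y ys =>
      by_cases h : x = y
      · simp [pvFirst, pvLcp, h, ih]
      · simp [pvFirst, pvLcp, h]

theorem pvSecond_char (zs : List (Char × Char)) :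
    pvSecond zs = if pvFirst zs = zs.length then zs.length
      else pvFirst zs + 1 + pvFirst (zs.drop (pvFirst zs + 1)) := by
  induction zs with
  | nil => simp [pvSecond, pvFirst]
  | cons p r ih =>
    obtain ⟨a, b⟩ := p
    by_cases h : a = b
    · by_cases hf : pvFirst r = r.length
      · simp [pvSecond, pvFirst, h, hf, ih]
      · have hne : ¬ (pvFirst r + 1 = r.length + 1) := by omega
        simp [pvSecond, pvFirst, h, hf, ih]
        omega
    · have hlen : ¬ ((0 : Nat) = r.length + 1) := by omega
      simp [pvSecond, pvFirst, h, hlen]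
      omega

theorem pvGetD_tail (l : List Int) (k : Nat) (d : Int) : l.tail.getD k d = l.getD (k + 1) d := by
  cases l <;> simp [List.getD]

theorem pvRow_get (x : Char) (xr : List Char) :
    ∀ (ys : List Char) (below : List Int),
      (∀ k : Nat, below.getD k 0 = (pvLcp xr (ys.drop k) : Int)) →
      ∀ j : Nat, (pvRow x ys below).getD j 0 = (pvLcp (x :: xr) (ys.drop j) : Int) := by
  intro ys
  induction ys with
  | nil =>
    intro below _ j
    cases j <;> simp [pvRow, pvLcp, List.getD]
  | cons y ys' ih =>
    intro below hb j
    have hb' : ∀ k : Nat, below.tail.getD k 0 = (pvLcp xr (ys'.drop k) : Int) := by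
      intro k
      rw [pvGetD_tail]
      simpa using hb (k + 1)
    cases j with
    | zero =>
      by_cases h : x = y
      · have h1 : below[1]?.getD 0 = (pvLcp xr ys' : Int) := by
          simpa [List.getD] using hb 1
        have h2 : below.tail.headD 0 = below[1]?.getD 0 := by
          cases below with
          | nil => simp
          | cons b bs => cases bs <;> simp
        rw [pvRow, List.getD_cons_zero, if_pos h, h2, h1]
        simp [pvLcp, h]
      · simp [pvRow, pvLcp, h]
    | succ j' =>
      simpa [pvRow] using ih below.tail hb' j'

theorem pvTable_head_get (ys : List Char) :
    ∀ (s : List Char) (j : Nat),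
      ((pvTable s ys).headD []).getD j 0 = (pvLcp s (ys.drop j) : Int) := by
  intro s
  induction s with
  | nil =>
    intro j
    cases hc : (ys.drop j) <;>
      simp [pvTable, pvLcp, List.getD, List.getElem?_replicate] <;>
      split <;> simp
  | cons x xr ih =>
    intro j
    exact pvRow_get x xr ys ((pvTable xr ys).headD []) ih j

theorem pvTable_getD (ys : List Char) :
    ∀ (s : List Char) (i : Nat), i ≤ s.length →
      (pvTable s ys).getD i [] = (pvTable (s.drop i) ys).headD [] := by
  intro s
  induction s with
  | nil =>
    intro i hi
    have h0 : i = 0 := by simpa using hi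
    subst h0
    simp [pvTable, List.getD]
  | cons x xr ih =>
    intro i hi
    cases i with
    | zero => simp [pvTable, List.getD]
    | succ i' => simpa [pvTable, List.getD] using ih i' (by simpa using hi)

-- combined: a table lookup is an lcp of suffixes
theorem pvLookup (xs ys : List Char) (i j : Nat) (hi : i ≤ xs.length) :
    PySem.List.pyGetD (PySem.List.pyGetD (pvTable xs ys) (i : Int) []) (j : Int) 0
      = (pvLcp (xs.drop i) (ys.drop j) : Int) := by
  rw [PySem.List.pyGetD_natCast, PySem.List.pyGetD_natCast, pvTable_getD ys xs i hi,
    pvTable_head_get ys (xs.drop i) j]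

-- per offset, B's candidate is pvSecond of the zipped overlap
theorem pvCandB (X Y : String) (k : Nat) (hk : k ≤ X.toList.length) :
    (let n := PySem.Str.len X
     let m := PySem.Str.len Y
     let lce := pvTable X.toList Y.toList
     let ov := min m (n - (k : Int))
     let k1 := PySem.List.pyGetD (PySem.List.pyGetD lce (k : Int) []) 0 0
     if k1 ≥ ov then ov
     else k1 + 1 + PySem.List.pyGetD (PySem.List.pyGetD lce ((k : Int) + k1 + 1) []) (k1 + 1) 0)
      = ((pvSecond (List.zip (X.toList.drop k) Y.toList) : Nat) : Int) := by
  set xs := X.toList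
  set ys := Y.toList
  set zs := List.zip (xs.drop k) ys with hzs
  have hlk1 : PySem.List.pyGetD (PySem.List.pyGetD (pvTable xs ys) (k : Int) []) ((0 : Nat) : Int) 0
      = (pvLcp (xs.drop k) (ys.drop 0) : Int) := pvLookup xs ys k 0 hk
  simp only [List.drop_zero, Nat.cast_zero] at hlk1
  set K1 := pvLcp (xs.drop k) ys with hK1
  have hzlen : zs.length = min ys.length (xs.length - k) := by
    rw [hzs, List.length_zip, List.length_drop]; omega
  have hov : min (PySem.Str.len Y) (PySem.Str.len X - (k : Int)) = (zs.length : Int) := by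
    rw [PySem.Str.len_eq, PySem.Str.len_eq, hzlen, Nat.cast_min, Nat.cast_sub hk]
  have hK1le : K1 ≤ zs.length := by
    have h1 := pvLcp_le (xs.drop k) ys
    rw [List.length_drop, Nat.min_comm] at h1
    omega
  have hfz : pvFirst zs = K1 := pvFirst_zip (xs.drop k) ys
  have hsec := pvSecond_char zs
  simp only [hlk1, hov]
  by_cases hge : (K1 : Int) ≥ (zs.length : Int)
  · have heq : K1 = zs.length := by omega
    rw [if_pos hge, hsec, if_pos (by rw [hfz]; omega)]
  · have hlt : K1 < zs.length := by omega
    rw [if_neg hge, hsec, if_neg (by rw [hfz]; omega), hfz]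
    have hidx : ((k : Int) + (K1 : Int) + 1) = (((k + K1 + 1 : Nat)) : Int) := by push_cast; ring
    have hjdx : ((K1 : Int) + 1) = (((K1 + 1 : Nat)) : Int) := by push_cast; ring
    have hki : k + K1 + 1 ≤ xs.length := by omega
    rw [hidx, hjdx, pvLookup xs ys (k + K1 + 1) (K1 + 1) hki]
    have hdd : xs.drop (k + K1 + 1) = (xs.drop k).drop (K1 + 1) := by
      rw [List.drop_drop]; ring_nf
    have hzd : zs.drop (K1 + 1) = List.zip ((xs.drop k).drop (K1 + 1)) (ys.drop (K1 + 1)) := by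
      rw [hzs]; simp [List.zip, List.drop_zipWith]
    rw [hdd, hzd, ← pvFirst_zip ((xs.drop k).drop (K1 + 1)) (ys.drop (K1 + 1))]
    push_cast; ring

-- per offset, A's inner loop is pvSecond of the zipped overlap
theorem pvCandA (X Y : String) (k : Nat) (hk : k ≤ X.toList.length) :
    pvInnerA X Y (k : Int)
        (PySem.List.pyRange 0 (min (PySem.Str.len Y) (PySem.Str.len X - (k : Int))) 1) 0 0
      = ((pvSecond (List.zip (X.toList.drop k) Y.toList) : Nat) : Int) := by
  set zs := List.zip (X.toList.drop k) Y.toList with hzs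
  have hlen : min (PySem.Str.len Y) (PySem.Str.len X - (k : Int)) = (zs.length : Int) := by
    rw [PySem.Str.len_eq, PySem.Str.len_eq, hzs, List.length_zip, List.length_drop]
    push_cast; omega
  rw [hlen]
  have hb := pvBridgeA X Y k zs hzs zs.length 0 (by omega) 0 0
  simp only [Nat.cast_zero] at hb
  rw [hb, List.drop_zero, pvInn_zero]
  ring

-- ===== VERDICT (by name: the statement is the Claim_ definition above) =====
theorem longest_matching_length_spec : Claim_equal_longest_matching_length := by
  intro X Y _
  simp only [Spec_longest_matching_length, longest_matching_length, longest_matching_length_alt]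
  apply PySem.List.foldl_congr_mem
  intro acc i hi
  have hmem := (PySem.List.mem_pyRange_one.mp hi)
  have hk : i = ((i.toNat : Nat) : Int) := by omega
  have hkle : i.toNat ≤ X.toList.length := by
    have := hmem.2
    rw [PySem.Str.len_eq] at this
    omega
  rw [hk, pvCandA X Y i.toNat hkle]
  have := pvCandB X Y i.toNat hkle
  simp only at this
  rw [this]
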